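-- pv_equiv track=rewrite | github.com/georgePadolsey/HackerRank | Challenges/Algorithms/Cryptography/basic-cryptanalysis/python/basic-cryptanalysis/georgep/pokuit/main.py | get_repeated_chars_pos
-- ===== SOURCE A (Python) =====
-- def get_repeated_chars_pos(_word):
--     """ Gets the position of repeated characters in the word and returns an array of each instance of them
--     :param _word: The word in for
--     :return: An array of each instance of them
--     """
--
--     repeated_chars = {}
--     i = 0
--     for char in _word:
--         if char in repeated_chars:
--             repeated_chars[char].append(i)
--
--         else:
--             repeated_chars[char] = [i]
--         i += 1
--
--     new_repeated_char = {}
--     for (_char, _arr) in repeated_chars.items():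
--         if len(_arr) >= 2:
--             new_repeated_char[_char] = _arr
--
--     return [item for sublist in new_repeated_char.values() for item in sublist]
-- ===== SOURCE B (Python) =====
-- def get_repeated_chars_pos(_word):
--     out = []
--     for char in dict.fromkeys(_word):
--         positions = [i for i, c in enumerate(_word) if c == char]
--         if len(positions) >= 2:
--             out += positions
--     return out
-- ===== Notes on version B (the rewrite author's own statement) =====
-- stated objective: simpler
-- what changed: Replaces the two-dict index-building pass (group positions in a dict, copy the >=2 entries into a second dict, flatten its values) by a direct loop over the distinct characters in first-appearance order that re-scans the word with enumerate for each distinct char and appends its position list when it has length >= 2.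
import Mathlib
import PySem

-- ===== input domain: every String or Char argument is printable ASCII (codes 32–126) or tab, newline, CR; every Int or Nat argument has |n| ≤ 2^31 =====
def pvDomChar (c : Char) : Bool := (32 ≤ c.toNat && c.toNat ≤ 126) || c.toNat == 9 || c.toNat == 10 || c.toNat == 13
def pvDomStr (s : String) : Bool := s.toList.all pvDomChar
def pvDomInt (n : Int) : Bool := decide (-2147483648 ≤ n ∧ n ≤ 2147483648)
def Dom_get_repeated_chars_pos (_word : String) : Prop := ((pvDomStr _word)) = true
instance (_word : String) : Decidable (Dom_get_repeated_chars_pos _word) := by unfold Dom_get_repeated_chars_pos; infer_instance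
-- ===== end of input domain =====

-- B replaces A's two-dict grouping pass by a loop over the distinct chars that
-- re-scans the word per char (simpler decomposition; return value only, no mutation).

-- ===== PORT A =====
def get_repeated_chars_pos (_word : String) : List Int :=
  -- repeated_chars = {}; for (i, char): append / create singleton
  let repeated_chars : PySem.Dict Char (List Int) :=
    (PySem.List.enumerate _word.toList 0).foldl
      (fun d p =>
        if d.contains p.2 then d.insert p.2 (d.getD p.2 [] ++ [p.1])
        else d.insert p.2 [p.1]) PySem.Dict.empty
  -- new_repeated_char = {}; keep entries with len >= 2
  let new_repeated_char : PySem.Dict Char (List Int) :=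
    repeated_chars.items.foldl
      (fun d p => if p.2.length ≥ 2 then d.insert p.1 p.2 else d) PySem.Dict.empty
  -- [item for sublist in new_repeated_char.values() for item in sublist]
  new_repeated_char.values.flatMap (fun sublist => sublist)

-- ===== PORT B =====
def get_repeated_chars_pos_alt (_word : String) : List Int :=
  (PySem.List.dedup _word.toList).foldl
    (fun out ch =>
      let positions :=
        ((PySem.List.enumerate _word.toList 0).filter (fun p => p.2 == ch)).map (·.1)
      if positions.length ≥ 2 then out ++ positions else out) []

-- ===== PRECONDITION & SPEC =====
def Spec_get_repeated_chars_pos (_word : String) (out : List Int) : Prop := out = get_repeated_chars_pos_alt _word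
instance (_word : String) (out : List Int) : Decidable (Spec_get_repeated_chars_pos _word out) := by unfold Spec_get_repeated_chars_pos; infer_instance

-- ===== CLAIM (what is proved, stated in full; the proofs are below) =====
def Claim_equal_get_repeated_chars_pos : Prop := ∀ (_word : String), Dom_get_repeated_chars_pos _word → Spec_get_repeated_chars_pos _word (get_repeated_chars_pos _word)

-- ===== LEMMAS AND PROOFS =====
-- step of A's first loop is Dict.modify
theorem pv_stepA_eq_modify (d : PySem.Dict Char (List Int)) (p : Int × Char) :
    (if d.contains p.2 then d.insert p.2 (d.getD p.2 [] ++ [p.1]) else d.insert p.2 [p.1])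
      = d.modify p.2 [] (· ++ [p.1]) := by
  by_cases h : d.contains p.2
  · simp [PySem.Dict.modify, h]
  · simp only [Bool.not_eq_true] at h
    simp [PySem.Dict.modify, h, PySem.Dict.getD_of_not_contains _ _ h]

-- characterization of A's grouping dict
theorem pv_repeated_items (l : List Char) :
    ((PySem.List.enumerate l 0).foldl
      (fun d p =>
        if d.contains p.2 then d.insert p.2 (d.getD p.2 [] ++ [p.1])
        else d.insert p.2 [p.1]) PySem.Dict.empty).items
      = (PySem.List.dedup l).map
          (fun c => (c, ((PySem.List.enumerate l 0).filter (fun p => p.2 == c)).map (·.1))) := by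
  have hstep : (fun (d : PySem.Dict Char (List Int)) (p : Int × Char) =>
      if d.contains p.2 then d.insert p.2 (d.getD p.2 [] ++ [p.1]) else d.insert p.2 [p.1])
      = fun d p => d.modify p.2 [] (· ++ [p.1]) := by
    funext d p; exact pv_stepA_eq_modify d p
  rw [hstep]
  have hmap : (PySem.List.enumerate l 0).foldl (fun d p => d.modify p.2 [] (· ++ [p.1]))
        (PySem.Dict.empty : PySem.Dict Char (List Int))
      = ((PySem.List.enumerate l 0).map (fun p => (p.2, p.1))).foldl
          (fun d p => d.modify p.1 [] (· ++ [p.2])) PySem.Dict.empty := by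
    rw [List.foldl_map]
  rw [hmap]
  set M := (PySem.List.enumerate l 0).map (fun p => (p.2, p.1)) with hM
  set D := M.foldl (fun d p => d.modify p.1 [] (· ++ [p.2]))
      (PySem.Dict.empty : PySem.Dict Char (List Int)) with hD
  have hkeys : D.keys = PySem.List.dedup l := by
    rw [hD]
    rw [PySem.Dict.keys_foldl_modify_key M (fun p => p.1) [] (fun _ p v => v ++ [p.2])]
    have : M.map (fun p => p.1) = l := by
      rw [hM, List.map_map]
      simp [Function.comp_def]
    rw [this]
    simp [PySem.Dict.empty, PySem.Dict.keys, PySem.Set.update_nil_left,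
      PySem.List.dedup_eq_ofList]
  have hnd : D.keys.Nodup := by rw [hkeys]; exact PySem.List.nodup_dedup l
  have hget : ∀ c : Char,
      D.getD c [] = ((PySem.List.enumerate l 0).filter (fun p => p.2 == c)).map (·.1) := by
    intro c
    rw [hD, PySem.Dict.getD_foldl_modify_append M PySem.Dict.empty c]
    rw [hM, List.filter_map, List.map_map]
    simp [Function.comp_def]
  rw [PySem.Dict.items_eq_map_keys D hnd [], hkeys]
  exact List.map_congr_left (fun c _ => by rw [hget c])

-- the filtering loop into the second dict
theorem pv_filter_fold (pairs : List (Char × List Int)) (d : PySem.Dict Char (List Int))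
    (hnd : (pairs.map Prod.fst).Nodup) (hfree : ∀ p ∈ pairs, d.contains p.1 = false) :
    (pairs.foldl (fun d p => if p.2.length ≥ 2 then d.insert p.1 p.2 else d) d).items
      = d.items ++ pairs.filter (fun p => decide (p.2.length ≥ 2)) := by
  induction pairs generalizing d with
  | nil => simp
  | cons p ps ih =>
    simp only [List.map_cons, List.nodup_cons] at hnd
    by_cases h : p.2.length ≥ 2
    · have hc : d.contains p.1 = false := hfree p (by simp)
      have hstep : (ps.foldl (fun d p => if p.2.length ≥ 2 then d.insert p.1 p.2 else d)
            (d.insert p.1 p.2)).items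
          = (d.insert p.1 p.2).items ++ ps.filter (fun p => decide (p.2.length ≥ 2)) := by
        apply ih
        · exact hnd.2
        · intro q hq
          rw [PySem.Dict.contains_insert]
          have hne : q.1 ≠ p.1 := by
            intro he; exact hnd.1 (he ▸ (List.mem_map.mpr ⟨q, hq, rfl⟩))
          simp [hne, hfree q (List.mem_cons_of_mem _ hq)]
      rw [List.foldl_cons, if_pos h, hstep,
        PySem.Dict.items_insert_of_not_contains d p.2 hc, List.filter_cons]
      simp [h]
    · rw [List.foldl_cons, if_neg h, List.filter_cons]
      rw [ih d hnd.2 (fun q hq => hfree q (List.mem_cons_of_mem _ hq))]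
      simp [h]

-- B's accumulation loop
theorem pv_append_if_fold (posf : Char → List Int) (xs : List Char) (acc : List Int) :
    xs.foldl (fun out ch => if (posf ch).length ≥ 2 then out ++ posf ch else out) acc
      = acc ++ (xs.filter (fun ch => decide ((posf ch).length ≥ 2))).flatMap posf := by
  induction xs generalizing acc with
  | nil => simp
  | cons c cs ih =>
    by_cases h : (posf c).length ≥ 2
    · simp [h, ih]
    · simp [h, ih]

-- ===== VERDICT (by name: the statement is the Claim_ definition above) =====
theorem get_repeated_chars_pos_spec : Claim_equal_get_repeated_chars_pos := by
  intro w _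
  simp only [Spec_get_repeated_chars_pos, get_repeated_chars_pos, get_repeated_chars_pos_alt]
  set l := w.toList with hl
  set posf : Char → List Int :=
    fun c => ((PySem.List.enumerate l 0).filter (fun p => p.2 == c)).map (·.1) with hposf
  rw [pv_repeated_items l]
  simp only [PySem.Dict.values]
  have hnodup : (((PySem.List.dedup l).map (fun c => (c, posf c))).map Prod.fst).Nodup := by
    rw [List.map_map]
    simp [Function.comp_def]
  rw [pv_filter_fold _ PySem.Dict.empty hnodup (fun p _ => PySem.Dict.contains_empty p.1)]
  rw [pv_append_if_fold posf (PySem.List.dedup l) []]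
  simp [PySem.Dict.empty, List.filter_map, List.flatMap_map, Function.comp_def]
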